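-- pv_equiv track=rewrite | github.com/nitpicker55555/Geo-QA-Paper | app_changed_agent.py | _find_comment_for_line
-- ===== SOURCE A (Python) =====
-- from typing import Dict, List, Optional, Any, Union, Tuple
--
-- def _find_comment_for_line(all_lines: List[str], target_line: str,
--                            session: Dict) -> str:
--     """Find appropriate comment for a line of code"""
--     special_char = '#><;' if session.get('template') else '#'
--
--     comment_positions = [
--         (i, line.strip()) for i, line in enumerate(all_lines)
--         if line.strip().startswith("#")
--     ]
--
--     try:
--         target_index = all_lines.index(target_line)
--     except ValueError:
--         return ""
--
--     for idx, (pos, comment) in enumerate(comment_positions):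
--         if idx + 1 < len(comment_positions):
--             next_pos = comment_positions[idx + 1][0]
--             if pos < target_index < next_pos:
--                 return comment.replace(special_char, '').replace("'",
--                                                                  '').strip()
--         else:
--             if pos < target_index:
--                 return comment.replace(special_char, '').replace("'",
--                                                                  '').strip()
--
--     return ""
-- ===== SOURCE B (Python) =====
-- def _find_comment_for_line(all_lines, target_line, session):
--     """Backward scan for the nearest preceding comment (no interval table)."""
--     special_char = '#><;' if session.get('template') else '#'
--     try:
--         target_index = all_lines.index(target_line)
--     except ValueError:
--         return ""
--     if target_line.strip().startswith("#"):
--         # a comment line carries no preceding-comment annotation of its own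
--         return ""
--     for line in reversed(all_lines[:target_index]):
--         stripped = line.strip()
--         if stripped.startswith("#"):
--             return stripped.replace(special_char, '').replace("'", '').strip()
--     return ""
-- ===== Notes on version B (the rewrite author's own statement) =====
-- stated objective: simpler
-- what changed: B drops A's enumerated comment-position table and its interval look-ahead scan, and instead scans backward from the target line's index returning the first comment line, with an explicit early return for a target that is itself a comment line.
import Mathlib
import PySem

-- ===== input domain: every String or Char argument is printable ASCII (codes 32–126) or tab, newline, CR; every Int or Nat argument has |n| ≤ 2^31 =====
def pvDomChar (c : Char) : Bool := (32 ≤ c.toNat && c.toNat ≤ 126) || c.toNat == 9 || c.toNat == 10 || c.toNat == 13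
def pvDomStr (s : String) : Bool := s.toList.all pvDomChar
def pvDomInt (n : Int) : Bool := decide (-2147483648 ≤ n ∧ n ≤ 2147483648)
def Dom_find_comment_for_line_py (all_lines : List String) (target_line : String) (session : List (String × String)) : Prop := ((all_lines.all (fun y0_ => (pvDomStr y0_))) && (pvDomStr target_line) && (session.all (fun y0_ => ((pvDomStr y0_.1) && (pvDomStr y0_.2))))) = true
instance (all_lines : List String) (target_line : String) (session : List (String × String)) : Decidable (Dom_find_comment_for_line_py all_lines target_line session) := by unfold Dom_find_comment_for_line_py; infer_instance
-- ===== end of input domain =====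

-- B replaces A's interval table over comment positions by a single backward scan from the
-- target line (objective: simpler).  Return values only; nothing is mutated by either version.

-- ===== PORT A =====
-- the interval loop: 'for idx, (pos, comment) in enumerate(comment_positions): …' with the
-- look-ahead 'comment_positions[idx + 1]' read off as the head of the remaining list
def fclA_loop (special : String) (ti : Int) : List (Int × String) → String
  | [] => ""
  | (pos, comment) :: rest =>
    match rest with
    | (next_pos, _) :: _ =>
      if pos < ti ∧ ti < next_pos then
        PySem.Str.strip (PySem.Str.replace (PySem.Str.replace comment special "") "'" "")
      else fclA_loop special ti rest
    | [] =>
      if pos < ti then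
        PySem.Str.strip (PySem.Str.replace (PySem.Str.replace comment special "") "'" "")
      else ""

def find_comment_for_line_py (all_lines : List String) (target_line : String) (session : List (String × String)) : String :=
  -- session.get('template') is truthy iff the key is present with a non-empty value
  let special_char :=
    match List.find? (fun kv => kv.1 == "template") session with
    | some kv => if kv.2 == "" then "#" else "#><;"
    | none => "#"
  let comment_positions :=
    ((PySem.List.enumerate all_lines 0).filter
        (fun p => PySem.Str.startswith (PySem.Str.strip p.2) "#")).map
      (fun p => (p.1, PySem.Str.strip p.2))
  match PySem.List.index? all_lines target_line with
  | none => ""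
  | some target_index => fclA_loop special_char (target_index : Int) comment_positions

-- ===== PORT B =====
-- 'for line in reversed(all_lines[:target_index]): …'
def fclB_scan (special : String) : List String → String
  | [] => ""
  | line :: rest =>
    let stripped := PySem.Str.strip line
    if PySem.Str.startswith stripped "#" then
      PySem.Str.strip (PySem.Str.replace (PySem.Str.replace stripped special "") "'" "")
    else fclB_scan special rest

def find_comment_for_line_py_alt (all_lines : List String) (target_line : String) (session : List (String × String)) : String :=
  let special_char :=
    match List.find? (fun kv => kv.1 == "template") session with
    | some kv => if kv.2 == "" then "#" else "#><;"
    | none => "#"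
  match PySem.List.index? all_lines target_line with
  | none => ""
  | some target_index =>
    if PySem.Str.startswith (PySem.Str.strip target_line) "#" then ""
    else fclB_scan special_char (PySem.List.slice all_lines none (some (target_index : Int))).reverse

-- ===== PRECONDITION & SPEC =====
def Spec_find_comment_for_line_py (all_lines : List String) (target_line : String) (session : List (String × String)) (out : String) : Prop := out = find_comment_for_line_py_alt all_lines target_line session
instance (all_lines : List String) (target_line : String) (session : List (String × String)) (out : String) : Decidable (Spec_find_comment_for_line_py all_lines target_line session out) := by unfold Spec_find_comment_for_line_py; infer_instance

-- ===== CLAIM (what is proved, stated in full; the proofs are below) =====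
def Claim_equal_find_comment_for_line_py : Prop := ∀ (all_lines : List String) (target_line : String) (session : List (String × String)), Dom_find_comment_for_line_py all_lines target_line session → Spec_find_comment_for_line_py all_lines target_line session (find_comment_for_line_py all_lines target_line session)

-- ===== LEMMAS AND PROOFS =====

-- abbreviations used only by the proofs
def pvIsC (l : String) : Bool := PySem.Str.startswith (PySem.Str.strip l) "#"
def pvTf (special c : String) : String :=
  PySem.Str.strip (PySem.Str.replace (PySem.Str.replace c special "") "'" "")

-- B's scan returns the transform of the first comment line it meets
theorem fclB_scan_eq_find? (special : String) (l : List String) :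
    fclB_scan special l =
      Option.elim (l.find? pvIsC) "" (fun x => pvTf special (PySem.Str.strip x)) := by
  induction l with
  | nil => rfl
  | cons x rest ih =>
    by_cases h : pvIsC x
    · simp [fclB_scan, List.find?_cons_of_pos h, pvIsC] at *
      simp [h, pvTf]
    · simp [fclB_scan, List.find?_cons_of_neg h, pvIsC] at *
      simp [h, ih]

-- first match in the reverse = last match
theorem find?_reverse_eq_getLast?_filter {α : Type} (p : α → Bool) (t : List α) :
    t.reverse.find? p = (t.filter p).getLast? := by
  induction t with
  | nil => rfl
  | cons x rest ih =>
    rw [List.reverse_cons, List.find?_append, ih, List.filter_cons]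
    by_cases h : p x
    · cases hfe : rest.filter p with
      | nil => simp [h]
      | cons a l =>
        cases hL : (a :: l).getLast? with
        | none => simp [List.getLast?_eq_none_iff] at hL
        | some y => simp [h, hL]
    · cases hfe : rest.filter p with
      | nil => simp [h]
      | cons a l => simp [h]

-- characterisation of A's interval loop when the target index is not a comment position
theorem fclA_loop_char (special : String) (ti : Int) (L : List (Int × String))
    (hp : L.Pairwise (fun p q => p.1 < q.1)) (hne : ∀ p ∈ L, p.1 ≠ ti) :
    fclA_loop special ti L =
      Option.elim ((L.filter (fun p => decide (p.1 < ti))).getLast?) ""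
        (fun p => pvTf special p.2) := by
  induction L with
  | nil => rfl
  | cons hd tl ih =>
    obtain ⟨pos, comment⟩ := hd
    rw [List.pairwise_cons] at hp
    have hne0 : pos ≠ ti := hne (pos, comment) (List.mem_cons_self)
    cases tl with
    | nil =>
      by_cases h : pos < ti <;> simp [fclA_loop, h, pvTf]
    | cons nxt tl' =>
      obtain ⟨np, c2⟩ := nxt
      have hnp : pos < np := hp.1 (np, c2) (List.mem_cons_self)
      have hnp_ne : np ≠ ti := hne (np, c2) (by simp)
      by_cases hcond : pos < ti ∧ ti < np
      · -- every later position is > ti, so the head is the last one below ti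
        have htail : ∀ q ∈ (np, c2) :: tl', ¬ (q.1 < ti) := by
          intro q hq
          rcases List.mem_cons.1 hq with h | h
          · subst h; omega
          · have := (List.pairwise_cons.1 hp.2).1 q h
            omega
        have hfil : ((np, c2) :: tl').filter (fun p => decide (p.1 < ti)) = [] := by
          rw [List.filter_eq_nil_iff]; intro q hq; simpa using htail q hq
        simp [fclA_loop, hcond, hfil, pvTf]
      · have ihs := ih hp.2 (fun q hq => hne q (List.mem_cons_of_mem _ hq))
        by_cases hlt : pos < ti
        · -- then np ≤ ti hence np < ti: the tail's filtered list is non-empty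
          have hnp_lt : np < ti := by
            rcases lt_or_ge np ti with h | h
            · exact h
            · exfalso; exact hcond ⟨hlt, lt_of_le_of_ne h (Ne.symm hnp_ne)⟩
          rw [show fclA_loop special ti ((pos, comment) :: (np, c2) :: tl') =
              fclA_loop special ti ((np, c2) :: tl') by simp [fclA_loop, hcond]]
          rw [ihs]
          have h1 : List.filter (fun p => decide (p.1 < ti)) ((pos, comment) :: (np, c2) :: tl') =
              (pos, comment) :: List.filter (fun p => decide (p.1 < ti)) ((np, c2) :: tl') := by
            rw [List.filter_cons]; simp [hlt]
          have h2 : List.filter (fun p => decide (p.1 < ti)) ((np, c2) :: tl') =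
              (np, c2) :: List.filter (fun p => decide (p.1 < ti)) tl' := by
            rw [List.filter_cons]; simp [hnp_lt]
          rw [h1, h2, List.getLast?_cons_cons]
        · -- pos > ti: nothing is below ti at all
          have hall : ∀ q ∈ (pos, comment) :: (np, c2) :: tl', ¬ (q.1 < ti) := by
            intro q hq
            have hposgt : ti < pos := lt_of_le_of_ne (by omega) (Ne.symm hne0)
            rcases List.mem_cons.1 hq with h | h
            · subst h; omega
            · have := hp.1 q h; omega
          have hfil : ((pos, comment) :: (np, c2) :: tl').filter
              (fun p => decide (p.1 < ti)) = [] := by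
            rw [List.filter_eq_nil_iff]; intro q hq; simpa using hall q hq
          rw [show fclA_loop special ti ((pos, comment) :: (np, c2) :: tl') =
              fclA_loop special ti ((np, c2) :: tl') by simp [fclA_loop, hcond]]
          rw [ihs, hfil]
          have : ((np, c2) :: tl').filter (fun p => decide (p.1 < ti)) = [] := by
            rw [List.filter_eq_nil_iff]; intro q hq
            simpa using hall q (List.mem_cons_of_mem _ hq)
          rw [this]

-- A's loop returns "" when the target index itself is a comment position
theorem fclA_loop_mem (special : String) (ti : Int) (L : List (Int × String))
    (hp : L.Pairwise (fun p q => p.1 < q.1)) (x : String) (hmem : (ti, x) ∈ L) :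
    fclA_loop special ti L = "" := by
  induction L with
  | nil => simp at hmem
  | cons hd tl ih =>
    obtain ⟨pos, comment⟩ := hd
    rw [List.pairwise_cons] at hp
    rcases List.mem_cons.1 hmem with h | h
    · -- head is the target position: pos = ti, both guards fail, tail is all > ti
      have hpos : pos = ti := by injection h with h1 _; omega
      subst hpos
      cases tl with
      | nil => simp [fclA_loop]
      | cons nxt tl' =>
        have : fclA_loop special pos ((pos, comment) :: nxt :: tl') =
            fclA_loop special pos (nxt :: tl') := by
          obtain ⟨np, c2⟩ := nxt; simp [fclA_loop]
        rw [this]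
        have hall : ∀ q ∈ nxt :: tl', q.1 ≠ pos := by
          intro q hq; have := hp.1 q hq; omega
        rw [fclA_loop_char special pos _ hp.2 hall]
        have hfil : (nxt :: tl').filter (fun p => decide (p.1 < pos)) = [] := by
          rw [List.filter_eq_nil_iff]; intro q hq
          have := hp.1 q hq; simp; omega
        rw [hfil]; rfl
    · -- target position is in the tail: head's look-ahead bound fails
      have hx : ti ∈ (tl.map Prod.fst) := List.mem_map_of_mem h
      cases tl with
      | nil => simp at h
      | cons nxt tl' =>
        obtain ⟨np, c2⟩ := nxt
        have hnple : np ≤ ti := by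
          rcases List.mem_cons.1 h with h' | h'
          · injection h' with h1 _; omega
          · have := (List.pairwise_cons.1 hp.2).1 _ h'; omega
        have : fclA_loop special ti ((pos, comment) :: (np, c2) :: tl') =
            fclA_loop special ti ((np, c2) :: tl') := by
          simp [fclA_loop]; omega
        rw [this]; exact ih hp.2 h

-- the comment-position table is strictly increasing in its positions
theorem pv_cps_pairwise (xs : List String) :
    (((PySem.List.enumerate xs 0).filter (fun p => pvIsC p.2)).map
        (fun p => (p.1, PySem.Str.strip p.2))).Pairwise (fun p q => p.1 < q.1) := by
  rw [List.pairwise_map]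
  exact List.Pairwise.sublist List.filter_sublist (PySem.List.pairwise_lt_enumerate xs 0)

-- second components of the table are the stripped comment lines, in order
theorem pv_cps_map_snd (xs : List String) (s : Int) :
    ((((PySem.List.enumerate xs s).filter (fun p => pvIsC p.2)).map
        (fun p => (p.1, PySem.Str.strip p.2))).map Prod.snd) =
      (xs.filter pvIsC).map PySem.Str.strip := by
  rw [List.map_map]
  have h1 : ((PySem.List.enumerate xs s).filter (fun p => pvIsC p.2)) =
      ((PySem.List.enumerate xs s).filter (pvIsC ∘ Prod.snd)) := rfl
  have h2 : (Prod.snd ∘ fun p : Int × String => (p.1, PySem.Str.strip p.2)) =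
      PySem.Str.strip ∘ Prod.snd := rfl
  rw [h1, h2, ← List.map_map, ← List.filter_map, PySem.List.map_snd_enumerate]

-- both programs agree once the index of the target line is known
theorem pv_main_core (special : String) (all_lines : List String) (target_line : String)
    (k : Nat) (hk : k < all_lines.length) (hget : all_lines[k] = target_line) :
    fclA_loop special (k : Int)
      (((PySem.List.enumerate all_lines 0).filter (fun p => pvIsC p.2)).map
        (fun p => (p.1, PySem.Str.strip p.2))) =
    (if pvIsC target_line then ""
     else fclB_scan special (PySem.List.slice all_lines none (some (k : Int))).reverse) := by
  have hslice : PySem.List.slice all_lines none (some (k : Int)) = all_lines.take k := by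
    rw [PySem.List.slice_to all_lines (Int.natCast_nonneg k)]
    simp
  by_cases hc : pvIsC target_line
  · rw [if_pos hc]
    have hmemE : ((0 : Int) + (k : Nat), all_lines[k]) ∈ PySem.List.enumerate all_lines 0 :=
      (PySem.List.mem_enumerate_iff _ _ _).2 ⟨k, hk, rfl⟩
    have hmemF : ((0 : Int) + (k : Nat), all_lines[k]) ∈
        (PySem.List.enumerate all_lines 0).filter (fun p => pvIsC p.2) := by
      rw [List.mem_filter]
      exact ⟨hmemE, by simp [hget, hc]⟩
    have hmem : ((k : Int), PySem.Str.strip target_line) ∈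
        (((PySem.List.enumerate all_lines 0).filter (fun p => pvIsC p.2)).map
          (fun p => (p.1, PySem.Str.strip p.2))) := by
      have := List.mem_map_of_mem (f := fun p : Int × String => (p.1, PySem.Str.strip p.2)) hmemF
      simpa [hget] using this
    exact fclA_loop_mem special (k : Int) _ (pv_cps_pairwise all_lines) _ hmem
  · rw [if_neg hc]
    have hne : ∀ p ∈ (((PySem.List.enumerate all_lines 0).filter (fun p => pvIsC p.2)).map
        (fun p => (p.1, PySem.Str.strip p.2))), p.1 ≠ (k : Int) := by
      intro p hp
      obtain ⟨q, hq, rfl⟩ := List.mem_map.1 hp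
      obtain ⟨hqE, hqC⟩ := List.mem_filter.1 hq
      obtain ⟨j, hj, rfl⟩ := (PySem.List.mem_enumerate_iff _ _ _).1 hqE
      simp only []
      intro hjk
      have : j = k := by omega
      subst this
      rw [hget] at hqC
      exact hc hqC
    rw [fclA_loop_char special _ _ (pv_cps_pairwise all_lines) hne]
    have hlen : (all_lines.take k).length = k := by
      simp [Nat.min_eq_left (Nat.le_of_lt hk)]
    conv_lhs => rw [show all_lines = all_lines.take k ++ all_lines.drop k from
      (List.take_append_drop k all_lines).symm]
    rw [PySem.List.enumerate_append, List.filter_append, List.map_append, List.filter_append]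
    have hT : ((((PySem.List.enumerate (all_lines.take k) 0).filter (fun p => pvIsC p.2)).map
          (fun p => (p.1, PySem.Str.strip p.2))).filter (fun p => decide (p.1 < (k : Int)))) =
        (((PySem.List.enumerate (all_lines.take k) 0).filter (fun p => pvIsC p.2)).map
          (fun p => (p.1, PySem.Str.strip p.2))) := by
      rw [List.filter_eq_self]
      intro p hp
      obtain ⟨q, hq, rfl⟩ := List.mem_map.1 hp
      obtain ⟨j, hj, rfl⟩ := (PySem.List.mem_enumerate_iff _ _ _).1 (List.mem_filter.1 hq).1
      rw [hlen] at hj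
      simp
      omega
    have hD : ((((PySem.List.enumerate (all_lines.drop k) (0 + (all_lines.take k).length)).filter
          (fun p => pvIsC p.2)).map
          (fun p => (p.1, PySem.Str.strip p.2))).filter (fun p => decide (p.1 < (k : Int)))) = [] := by
      rw [List.filter_eq_nil_iff]
      intro p hp
      obtain ⟨q, hq, rfl⟩ := List.mem_map.1 hp
      obtain ⟨j, hj, rfl⟩ := (PySem.List.mem_enumerate_iff _ _ _).1 (List.mem_filter.1 hq).1
      rw [hlen]
      simp
    rw [hT, hD, List.append_nil]
    rw [hslice, fclB_scan_eq_find?, find?_reverse_eq_getLast?_filter]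
    have hsnd := pv_cps_map_snd (all_lines.take k) 0
    have hmap : ((((PySem.List.enumerate (all_lines.take k) 0).filter (fun p => pvIsC p.2)).map
          (fun p => (p.1, PySem.Str.strip p.2))).getLast?).map Prod.snd =
        (((all_lines.take k).filter pvIsC).getLast?).map PySem.Str.strip := by
      rw [← List.getLast?_map, hsnd, List.getLast?_map]
    cases hL : ((all_lines.take k).filter pvIsC).getLast? with
    | none =>
      have h0 : ((all_lines.take k).filter pvIsC) = [] := List.getLast?_eq_none_iff.1 hL
      have hcps : (((PySem.List.enumerate (all_lines.take k) 0).filter (fun p => pvIsC p.2)).map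
          (fun p => (p.1, PySem.Str.strip p.2))) = [] :=
        List.map_eq_nil_iff.1 (by rw [hsnd, h0]; rfl)
      rw [hcps]
      rfl
    | some x =>
      rw [hL, Option.map_some] at hmap
      obtain ⟨p, hp, hps⟩ := Option.map_eq_some_iff.1 hmap
      rw [hp]
      simp [hps]

-- ===== VERDICT (by name: the statement is the Claim_ definition above) =====
theorem find_comment_for_line_py_spec : Claim_equal_find_comment_for_line_py := by
  intro all_lines target_line session _dom
  unfold Spec_find_comment_for_line_py find_comment_for_line_py find_comment_for_line_py_alt
  cases hidx : PySem.List.index? all_lines target_line with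
  | none => rfl
  | some k =>
    obtain ⟨hk, hget, -⟩ := PySem.List.getElem_of_index?_eq_some hidx
    exact pv_main_core _ all_lines target_line k hk hget
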